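-- pv_equiv track=rewrite | github.com/HARP-research-Inc/WordNetExplorer | src/parsing/token_processor.py | get_token_shape_category
-- ===== SOURCE A (Python) =====
-- def get_token_shape_category(shape: str) -> str:
--     """
--     Categorize token shape for pattern matching.
--
--     Categories:
--     - 'lower': all lowercase
--     - 'upper': all uppercase
--     - 'title': title case
--     - 'mixed': mixed case
--     - 'digit': contains digits
--     - 'punct': punctuation
--     - 'other': everything else
--
--     Args:
--         shape: spaCy shape string
--
--     Returns:
--         Shape category
--     """
--     if not shape:
--         return 'other'
--
--     # Check for digits
--     if 'd' in shape:
--         return 'digit'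
--
--     # Check for punctuation only
--     if all(c in '.,;:!?\'"()-[]{}' for c in shape):
--         return 'punct'
--
--     # Check case patterns
--     if shape.islower() or all(c == 'x' for c in shape):
--         return 'lower'
--     elif shape.isupper() or all(c == 'X' for c in shape):
--         return 'upper'
--     elif shape[0].isupper() and shape[1:].islower():
--         return 'title'
--     elif any(c.isupper() for c in shape) and any(c.islower() for c in shape):
--         return 'mixed'
--
--     return 'other'
-- ===== SOURCE B (Python) =====
-- def get_token_shape_category(shape: str) -> str:
--     # One pass over the string collecting boolean flags, then classify from the
--     # flags in the original priority order; exact for the printable-ASCII domain.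
--     if not shape:
--         return 'other'
--     punct = '.,;:!?\'"()-[]{}'
--     c0 = shape[0]
--     has_d = c0 == 'd'
--     all_punct = c0 in punct
--     rest_low = rest_up = False
--     for c in shape[1:]:
--         if c == 'd':
--             has_d = True
--         if c not in punct:
--             all_punct = False
--         rest_low = rest_low or ('a' <= c <= 'z')
--         rest_up = rest_up or ('A' <= c <= 'Z')
--     if has_d:
--         return 'digit'
--     if all_punct:
--         return 'punct'
--     low = ('a' <= c0 <= 'z') or rest_low
--     up = ('A' <= c0 <= 'Z') or rest_up
--     if low and not up:
--         return 'lower'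
--     if up and not low:
--         return 'upper'
--     if ('A' <= c0 <= 'Z') and rest_low and not rest_up:
--         return 'title'
--     if up and low:
--         return 'mixed'
--     return 'other'
-- ===== Notes on version B (the rewrite author's own statement) =====
-- stated objective: alternative
-- what changed: B makes a single pass over the string collecting boolean flags (has 'd', all-punctuation, lowercase/uppercase letter seen in the rest) and classifies from the flags, replacing A's repeated whole-string scans via islower/isupper/all/any.
import Mathlib
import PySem

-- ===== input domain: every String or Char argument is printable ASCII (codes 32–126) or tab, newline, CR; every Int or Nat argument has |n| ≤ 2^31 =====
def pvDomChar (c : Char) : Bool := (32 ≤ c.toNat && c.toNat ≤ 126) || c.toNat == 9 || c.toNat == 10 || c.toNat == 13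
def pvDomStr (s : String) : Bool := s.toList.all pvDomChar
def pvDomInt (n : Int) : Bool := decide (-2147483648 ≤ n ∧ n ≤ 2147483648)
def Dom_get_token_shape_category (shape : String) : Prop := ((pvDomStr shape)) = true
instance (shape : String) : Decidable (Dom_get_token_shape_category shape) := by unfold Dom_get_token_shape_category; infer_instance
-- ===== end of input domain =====

-- B replaces A's repeated whole-string scans (islower/isupper/all/any) by one pass
-- collecting boolean flags and classifies from the flags (objective: alternative decomposition).

-- ===== PORT A =====
-- str.islower() / str.isupper() (at least one cased char, no char of the opposite case);
-- exact on the ASCII domain, where the cased chars are exactly a–z / A–Z.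
def pyStrIslower (cs : List Char) : Bool :=
  cs.any PySem.Chars.islower && !cs.any PySem.Chars.isupper

def pyStrIsupper (cs : List Char) : Bool :=
  cs.any PySem.Chars.isupper && !cs.any PySem.Chars.islower

def get_token_shape_category (shape : String) : String :=
  let cs := shape.toList
  if cs.isEmpty then "other"
  else if PySem.Chars.isIn ['d'] cs then "digit"         -- 'd' in shape
  else if cs.all (fun c => (".,;:!?'\"()-[]{}".toList).contains c) then "punct"
  else if pyStrIslower cs || cs.all (fun c => c == 'x') then "lower"
  else if pyStrIsupper cs || cs.all (fun c => c == 'X') then "upper"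
  -- shape[0].isupper() and shape[1:].islower()
  else if ((PySem.List.pyGet? cs 0).elim false (fun c => pyStrIsupper [c])) &&
          pyStrIslower (PySem.List.slice cs (some 1) none) then "title"
  else if cs.any PySem.Chars.isupper && cs.any PySem.Chars.islower then "mixed"
  else "other"

-- ===== PORT B =====
def get_token_shape_category_alt (shape : String) : String :=
  match shape.toList with
  | [] => "other"
  | c0 :: rest =>
    let punct := ".,;:!?'\"()-[]{}".toList
    let st := rest.foldl
      (fun (s : Bool × Bool × Bool × Bool) c =>
        ((if c == 'd' then true else s.1),
         (if !punct.contains c then false else s.2.1),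
         (s.2.2.1 || PySem.Chars.islower c),
         (s.2.2.2 || PySem.Chars.isupper c)))
      (c0 == 'd', punct.contains c0, false, false)
    if st.1 then "digit"
    else if st.2.1 then "punct"
    else
      let low := PySem.Chars.islower c0 || st.2.2.1
      let up  := PySem.Chars.isupper c0 || st.2.2.2
      if low && !up then "lower"
      else if up && !low then "upper"
      else if PySem.Chars.isupper c0 && st.2.2.1 && !st.2.2.2 then "title"
      else if up && low then "mixed"
      else "other"

-- ===== PRECONDITION & SPEC =====
def Spec_get_token_shape_category (shape : String) (out : String) : Prop := out = get_token_shape_category_alt shape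
instance (shape : String) (out : String) : Decidable (Spec_get_token_shape_category shape out) := by unfold Spec_get_token_shape_category; infer_instance

-- ===== CLAIM (what is proved, stated in full; the proofs are below) =====
def Claim_equal_get_token_shape_category : Prop := ∀ (shape : String), Dom_get_token_shape_category shape → Spec_get_token_shape_category shape (get_token_shape_category shape)

-- ===== LEMMAS AND PROOFS =====

-- B's single fold computes the four flags as any/all over the list.
lemma fold_flags (rest : List Char) (d p l u : Bool) :
    rest.foldl
      (fun (s : Bool × Bool × Bool × Bool) c =>
        ((if c == 'd' then true else s.1),
         (if !(".,;:!?'\"()-[]{}".toList).contains c then false else s.2.1),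
         (s.2.2.1 || PySem.Chars.islower c),
         (s.2.2.2 || PySem.Chars.isupper c)))
      (d, p, l, u) =
    (d || rest.any (· == 'd'),
     p && rest.all (fun c => (".,;:!?'\"()-[]{}".toList).contains c),
     l || rest.any PySem.Chars.islower,
     u || rest.any PySem.Chars.isupper) := by
  induction rest generalizing d p l u with
  | nil => simp
  | cons c cs ih =>
    simp only [List.foldl_cons, List.any_cons, List.all_cons, ih]
    cases h : (c == 'd') <;> cases hp : (".,;:!?'\"()-[]{}".toList).contains c <;>
      simp [Bool.or_assoc]

lemma isIn_single (cs : List Char) (a : Char) :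
    PySem.Chars.isIn [a] cs = cs.any (· == a) := by
  rcases h : cs.any (· == a) with _ | _
  · rw [PySem.Chars.isIn_eq_false_iff]
    intro hinf
    have : a ∈ cs := (List.singleton_infix_iff a cs).mp hinf
    simp at h
    exact h a this rfl
  · rw [PySem.Chars.isIn_iff_infix]
    simp only [List.any_eq_true, beq_iff_eq] at h
    obtain ⟨x, hx, rfl⟩ := h
    exact (List.singleton_infix_iff x cs).mpr hx

lemma any_false_of_all (rest : List Char) (x : Char) (p : Char → Bool)
    (hpx : p x = false) (hall : rest.all (fun c => c == x) = true) : rest.any p = false := by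
  simp only [List.all_eq_true, beq_iff_eq] at hall
  simp only [List.any_eq_false]
  intro c hc; rw [hall c hc, hpx]; exact Bool.false_ne_true

lemma isupper_not_islower (c : Char) :
    (PySem.Chars.isupper c && !PySem.Chars.islower c) = PySem.Chars.isupper c := by
  simp only [PySem.Chars.isupper, PySem.Chars.islower]
  rcases hu : decide ('A' ≤ c) && decide (c ≤ 'Z') with _ | _
  · simp
  · rw [Bool.and_eq_true, decide_eq_true_iff, decide_eq_true_iff] at hu
    have : ¬ ('a' ≤ c) := by
      simp only [Char.le_def] at hu ⊢
      intro h3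
      exact absurd (UInt32.le_trans h3 hu.2) (by decide)
    simp [this]

-- ===== VERDICT (by name: the statement is the Claim_ definition above) =====
theorem get_token_shape_category_spec : Claim_equal_get_token_shape_category := by
  intro shape _
  unfold Spec_get_token_shape_category get_token_shape_category get_token_shape_category_alt
  cases h : shape.toList with
  | nil => simp
  | cons c0 rest =>
    have hs : PySem.List.slice (c0 :: rest) (some 1) none = rest := by
      rw [PySem.List.slice_from _ (by norm_num)]; rfl
    have hg : PySem.List.pyGet? (c0 :: rest) 0 = some c0 := by
      exact PySem.List.pyGet?_natCast (c0 :: rest) 0 |>.trans (by simp)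
    -- the redundant all-'x' / all-'X' disjuncts of A are absorbed by the case flags
    have e1 : ((PySem.Chars.islower c0 || rest.any PySem.Chars.islower) &&
          !(PySem.Chars.isupper c0 || rest.any PySem.Chars.isupper) ||
          (c0 == 'x' && rest.all fun c => c == 'x')) =
        ((PySem.Chars.islower c0 || rest.any PySem.Chars.islower) &&
          !(PySem.Chars.isupper c0 || rest.any PySem.Chars.isupper)) := by
      cases hx : (c0 == 'x' && rest.all fun c => c == 'x') with
      | false => simp
      | true =>
        rw [Bool.and_eq_true] at hx
        have hc0 : c0 = 'x' := by simpa using hx.1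
        have hru : rest.any PySem.Chars.isupper = false :=
          any_false_of_all rest 'x' _ (by decide) hx.2
        simp [hc0, hru, show PySem.Chars.islower 'x' = true from rfl,
          show PySem.Chars.isupper 'x' = false from rfl]
    have e2 : ((PySem.Chars.isupper c0 || rest.any PySem.Chars.isupper) &&
          !(PySem.Chars.islower c0 || rest.any PySem.Chars.islower) ||
          (c0 == 'X' && rest.all fun c => c == 'X')) =
        ((PySem.Chars.isupper c0 || rest.any PySem.Chars.isupper) &&
          !(PySem.Chars.islower c0 || rest.any PySem.Chars.islower)) := by
      cases hx : (c0 == 'X' && rest.all fun c => c == 'X') with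
      | false => simp
      | true =>
        rw [Bool.and_eq_true] at hx
        have hc0 : c0 = 'X' := by simpa using hx.1
        have hrl : rest.any PySem.Chars.islower = false :=
          any_false_of_all rest 'X' _ (by decide) hx.2
        simp [hc0, hrl, show PySem.Chars.isupper 'X' = true from rfl,
          show PySem.Chars.islower 'X' = false from rfl]
    simp only [List.isEmpty_cons, if_neg Bool.false_ne_true, fold_flags, isIn_single,
      pyStrIslower, pyStrIsupper, hs, hg, Option.elim_some,
      List.any_cons, List.all_cons, List.any_nil, Bool.or_false, Bool.false_or,
      e1, e2, isupper_not_islower, Bool.and_assoc]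
    rfl
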